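-- pv_equiv track=rewrite | github.com/tezedge/signer | signer/sign.py | _decode_zarith
-- ===== SOURCE A (Python) =====
-- def _decode_zarith(raw_bytes, start):
--     num_list = []
--     res_list = []
--     counter = 0
--
--     for i in range(4):
--         next_b = 1
--         while next_b:
--             num = raw_bytes[start + counter] & ~(1 << 7)
--             num_list.append(num)
--             next_b = raw_bytes[start + counter] >> 7
--             counter += 1
--         res = num_list.pop()
--         while num_list:
--             res = res << 7 | num_list.pop()
--
--         res_list.append(res)
--
--     return res_list, counter
-- ===== SOURCE B (Python) =====
-- def _decode_zarith(raw_bytes, start):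
--     # Instead of collecting 7-bit chunks into a list and then popping it back
--     # down in a second loop, scan forward to find each group's final byte and
--     # accumulate the value in one backward indexed pass (no intermediate list).
--     res_list = []
--     pos = start
--     for _ in range(4):
--         end = pos
--         while raw_bytes[end] >> 7:
--             end += 1
--         res = 0
--         for j in range(end, pos - 1, -1):
--             res = res << 7 | (raw_bytes[j] & ~(1 << 7))
--         res_list.append(res)
--         pos = end + 1
--     return res_list, pos - start
-- ===== Notes on version B (the rewrite author's own statement) =====
-- stated objective: simpler
-- what changed: B drops A's chunk list and its pop-and-fold second while-loop: it scans forward to each group's terminator byte and accumulates the value in a single backward indexed pass.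
import Mathlib
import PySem

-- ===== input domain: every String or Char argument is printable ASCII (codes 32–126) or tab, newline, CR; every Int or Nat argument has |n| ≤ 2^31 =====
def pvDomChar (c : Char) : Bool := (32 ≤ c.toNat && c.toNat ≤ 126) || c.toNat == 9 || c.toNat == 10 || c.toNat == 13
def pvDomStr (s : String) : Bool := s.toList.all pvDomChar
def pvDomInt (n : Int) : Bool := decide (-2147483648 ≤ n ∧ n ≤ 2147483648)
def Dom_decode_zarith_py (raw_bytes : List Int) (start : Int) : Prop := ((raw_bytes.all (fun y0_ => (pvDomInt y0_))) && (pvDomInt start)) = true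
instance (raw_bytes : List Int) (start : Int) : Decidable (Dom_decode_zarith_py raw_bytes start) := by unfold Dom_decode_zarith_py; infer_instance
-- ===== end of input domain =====

-- B replaces A's collect-chunks-into-a-list-then-pop-and-fold strategy by a forward scan
-- for each group's last byte followed by a single backward indexed accumulation (simpler:
-- no intermediate list and no pop loop). Equivalence of the return value is proved below.

-- ===== PORT A =====
-- inner `while next_b:` loop: reads raw_bytes[start+counter], appends the masked chunk,
-- advances counter; fuel (2*len+1 ≥ any possible number of reads) totalizes it; none = IndexError
def zCollectA (raw : List Int) (start : Int) : Nat → Int → List Int → Option (List Int × Int)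
  | 0, _, _ => none
  | fuel + 1, counter, numList =>
    match PySem.List.pyGet? raw (start + counter) with
    | none => none
    | some b =>
      if b >>> (7 : Nat) ≠ 0 then
        zCollectA raw start fuel (counter + 1) (numList ++ [PySem.Int.band b (Int.not ((1 : Int) <<< (7 : Nat)))])
      else some (numList ++ [PySem.Int.band b (Int.not ((1 : Int) <<< (7 : Nat)))], counter + 1)

-- `while num_list: res = res << 7 | num_list.pop()` (popping = walking the reversed list)
def zPopFoldA (res : Int) : List Int → Int
  | [] => res
  | n :: t => zPopFoldA (PySem.Int.bor (res <<< (7 : Nat)) n) t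

-- `for i in range(4):` with the shared counter and res_list accumulator
def zGroupsA (raw : List Int) (start : Int) : Nat → Int → List Int → Option (List Int × Int)
  | 0, counter, resList => some (resList, counter)
  | n + 1, counter, resList =>
    match zCollectA raw start (2 * raw.length + 1) counter [] with
    | none => none
    | some (numList, counter') =>
      match numList.reverse with
      | [] => none   -- `res = num_list.pop()` on an empty list: unreachable (each group appends first)
      | r :: rest => zGroupsA raw start n counter' (resList ++ [zPopFoldA r rest])

def decode_zarith_py (raw_bytes : List Int) (start : Int) : List Int × Int :=
  (zGroupsA raw_bytes start 4 0 []).getD ([], 0)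

-- ===== PORT B =====
-- `while raw_bytes[end] >> 7: end += 1` — find the group's final byte; fuel totalizes, none = IndexError
def zScanB (raw : List Int) : Nat → Int → Option Int
  | 0, _ => none
  | fuel + 1, e =>
    match PySem.List.pyGet? raw e with
    | none => none
    | some b => if b >>> (7 : Nat) ≠ 0 then zScanB raw fuel (e + 1) else some e

-- `for j in range(end, pos - 1, -1): res = res << 7 | (raw_bytes[j] & ~(1 << 7))`
-- (the none branch is unreachable: the scan already visited every index of the range)
def zBackFoldB (raw : List Int) : Int → List Int → Option Int
  | res, [] => some res
  | res, j :: t =>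
    match PySem.List.pyGet? raw j with
    | none => none
    | some b =>
      zBackFoldB raw (PySem.Int.bor (res <<< (7 : Nat)) (PySem.Int.band b (Int.not ((1 : Int) <<< (7 : Nat))))) t

-- `for _ in range(4):` with the absolute position pos and res_list accumulator
def zGroupsB (raw : List Int) : Nat → Int → List Int → Option (List Int × Int)
  | 0, pos, resList => some (resList, pos)
  | n + 1, pos, resList =>
    match zScanB raw (2 * raw.length + 1) pos with
    | none => none
    | some e =>
      match zBackFoldB raw 0 (PySem.List.pyRange e (pos - 1) (-1)) with
      | none => none
      | some res => zGroupsB raw n (e + 1) (resList ++ [res])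

def decode_zarith_py_alt (raw_bytes : List Int) (start : Int) : List Int × Int :=
  match zGroupsB raw_bytes 4 start [] with
  | none => ([], 0)
  | some (resList, pos) => (resList, pos - start)

-- ===== PRECONDITION & SPEC =====
-- the byte sequence A's reads traverse: indices start, start+1, … (Python negative indices
-- address from the end, so a negative start reads the tail raw[len+start:] and then wraps
-- once through the whole list before indexing fails)
def zReadWindow (raw : List Int) (start : Int) : List Int :=
  if 0 ≤ start then raw.drop start.toNat
  else if -(raw.length : Int) ≤ start then raw.drop ((raw.length : Int) + start).toNat ++ raw
  else []

-- Pre_ holds exactly when the Python A returns: at least 4 terminator bytes (value in 0..127)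
-- occur in the window its reads can reach; on every other input A raises IndexError.
def Pre_decode_zarith_py (raw_bytes : List Int) (start : Int) : Prop :=
  4 ≤ ((zReadWindow raw_bytes start).filter (fun b => decide (0 ≤ b) && decide (b < 128))).length

instance (raw_bytes : List Int) (start : Int) : Decidable (Pre_decode_zarith_py raw_bytes start) := by
  unfold Pre_decode_zarith_py; infer_instance

def pvWitness_decode_zarith_py : List Int × Int := ([1, 130, 2, 3, 4], 0)

def Spec_decode_zarith_py (raw_bytes : List Int) (start : Int) (out : List Int × Int) : Prop := out = decode_zarith_py_alt raw_bytes start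
instance (raw_bytes : List Int) (start : Int) (out : List Int × Int) : Decidable (Spec_decode_zarith_py raw_bytes start out) := by unfold Spec_decode_zarith_py; infer_instance

-- ===== CLAIM (what is proved, stated in full; the proofs are below) =====
def Claim_equal_decode_zarith_py : Prop := ∀ (raw_bytes : List Int) (start : Int), Dom_decode_zarith_py raw_bytes start → Pre_decode_zarith_py raw_bytes start → Spec_decode_zarith_py raw_bytes start (decode_zarith_py raw_bytes start)

-- ===== LEMMAS AND PROOFS =====

-- append the smallest element at the tail of a descending range
theorem zpyRange_neg_one_snoc (a b : Int) (h : b < a) :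
    PySem.List.pyRange a b (-1) = PySem.List.pyRange a (b + 1) (-1) ++ [b + 1] := by
  rw [PySem.List.pyRange_neg_one_eq_reverse, PySem.List.pyRange_neg_one_eq_reverse,
    PySem.List.pyRange_one_cons (by omega : b + 1 < a + 1), List.reverse_cons]

theorem zPopFoldA_append (l1 l2 : List Int) (r : Int) :
    zPopFoldA r (l1 ++ l2) = zPopFoldA (zPopFoldA r l1) l2 := by
  induction l1 generalizing r with
  | nil => simp [zPopFoldA]
  | cons n t ih => simp [zPopFoldA, ih]

theorem zBackFoldB_append (raw : List Int) (l1 l2 : List Int) (r : Int) :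
    zBackFoldB raw r (l1 ++ l2) = (zBackFoldB raw r l1).bind (fun r' => zBackFoldB raw r' l2) := by
  induction l1 generalizing r with
  | nil => simp [zBackFoldB]
  | cons j t ih =>
    simp only [List.cons_append, zBackFoldB]
    cases PySem.List.pyGet? raw j with
    | none => rfl
    | some b => exact ih _

theorem zBor_zero_left (r : Int) : PySem.Int.bor ((0 : Int) <<< (7 : Nat)) r = r := by
  have h0 : ((0 : Int) <<< (7 : Nat)) = 0 := by decide
  rw [h0, PySem.Int.bor_comm, PySem.Int.bor_zero]

-- the main invariant: A's collect loop vs B's scan, and the value relation between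
-- A's pop-fold of the collected chunks and B's backward fold over the index range
theorem zRel (raw : List Int) (start : Int) : ∀ (fuel : Nat) (c : Int) (acc : List Int),
    (zCollectA raw start fuel c acc = none → zScanB raw fuel (start + c) = none) ∧
    (∀ nums c', zCollectA raw start fuel c acc = some (nums, c') →
      c < c' ∧ ∃ ms, ms ≠ [] ∧ nums = acc ++ ms ∧
        zScanB raw fuel (start + c) = some (start + c' - 1) ∧
        ∀ r0 : Int, zBackFoldB raw r0 (PySem.List.pyRange (start + c' - 1) (start + c - 1) (-1)) =
          some (zPopFoldA r0 ms.reverse)) := by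
  intro fuel
  induction fuel with
  | zero =>
    intro c acc
    exact ⟨fun _ => rfl, fun nums c' h => by simp [zCollectA] at h⟩
  | succ f ih =>
    intro c acc
    cases hb : PySem.List.pyGet? raw (start + c) with
    | none =>
      refine ⟨fun _ => by simp [zScanB, hb], fun nums c' h => ?_⟩
      simp [zCollectA, hb] at h
    | some b =>
      by_cases hnb : b >>> (7 : Nat) ≠ 0
      · constructor
        · intro h
          simp only [zCollectA, hb, if_pos hnb] at h
          simp only [zScanB, hb, if_pos hnb]
          rw [show start + c + 1 = start + (c + 1) by ring]
          exact (ih (c + 1) _).1 h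
        · intro nums c' h
          simp only [zCollectA, hb, if_pos hnb] at h
          obtain ⟨hc, ms', hne, hnums, hscan, hfold⟩ := (ih (c + 1) _).2 nums c' h
          refine ⟨by omega, PySem.Int.band b (Int.not ((1 : Int) <<< (7 : Nat))) :: ms', by simp, by
            simpa [List.append_assoc] using hnums, ?_, ?_⟩
          · simp only [zScanB, hb, if_pos hnb]
            rw [show start + c + 1 = start + (c + 1) by ring]
            exact hscan
          · intro r0
            have hsplit : PySem.List.pyRange (start + c' - 1) (start + c - 1) (-1) =
                PySem.List.pyRange (start + c' - 1) (start + c) (-1) ++ [start + c] := by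
              have h2 := zpyRange_neg_one_snoc (start + c' - 1) (start + c - 1) (by omega)
              rw [h2]
              norm_num
            rw [hsplit, zBackFoldB_append]
            have h3 := hfold r0
            rw [show start + (c + 1) - 1 = start + c by ring] at h3
            rw [h3]
            simp only [Option.bind_some, zBackFoldB, hb]
            rw [List.reverse_cons, zPopFoldA_append]
            rfl
      · constructor
        · intro h
          simp only [zCollectA, hb, if_neg hnb] at h
          exact absurd h (by simp)
        · intro nums c' h
          simp only [zCollectA, hb, if_neg hnb, Option.some.injEq, Prod.mk.injEq] at h
          obtain ⟨hnums, hc'⟩ := h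
          subst hc'
          refine ⟨by omega, [PySem.Int.band b (Int.not ((1 : Int) <<< (7 : Nat)))], by simp,
            hnums.symm, ?_, ?_⟩
          · simp only [zScanB, hb, if_neg hnb]
            have h4 : start + (c + 1) - 1 = start + c := by ring
            rw [h4]
          · intro r0
            have h1 : PySem.List.pyRange (start + (c + 1) - 1) (start + c - 1) (-1) = [start + c] := by
              have h2 := zpyRange_neg_one_snoc (start + (c + 1) - 1) (start + c - 1) (by omega)
              rw [h2, PySem.List.pyRange_neg_one_eq_nil (by omega)]
              have h5 : start + c - 1 + 1 = start + c := by ring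
              rw [h5, List.nil_append]
            rw [h1]
            simp [zBackFoldB, hb, zPopFoldA]

-- the four-group loops agree (B carries the absolute position start + counter)
theorem zGroups_rel (raw : List Int) (start : Int) : ∀ (n : Nat) (c : Int) (rl : List Int),
    zGroupsB raw n (start + c) rl = (zGroupsA raw start n c rl).map (fun p => (p.1, start + p.2)) := by
  intro n
  induction n with
  | zero => intro c rl; rfl
  | succ m ih =>
    intro c rl
    cases hcol : zCollectA raw start (2 * raw.length + 1) c [] with
    | none =>
      have hscan := (zRel raw start (2 * raw.length + 1) c []).1 hcol
      simp [zGroupsA, zGroupsB, hcol, hscan]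
    | some p =>
      obtain ⟨nums, c'⟩ := p
      obtain ⟨hc, ms, hne, hnums, hscan, hfold⟩ :=
        (zRel raw start (2 * raw.length + 1) c []).2 nums c' hcol
      simp only [List.nil_append] at hnums
      subst hnums
      have hfold0 := hfold 0
      cases hrev : nums.reverse with
      | nil => exact absurd (by simpa using congrArg List.reverse hrev) hne
      | cons r rest =>
        rw [hrev] at hfold0
        simp only [zPopFoldA, zBor_zero_left] at hfold0
        simp only [zGroupsA, zGroupsB, hcol, hscan, hfold0, hrev]
        rw [show start + c' - 1 + 1 = start + c' by ring]
        exact ih c' (rl ++ [zPopFoldA r rest])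

-- ===== VERDICT (by name: the statement is the Claim_ definition above) =====
theorem decode_zarith_py_spec : Claim_equal_decode_zarith_py := by
  intro raw_bytes start _ _
  unfold Spec_decode_zarith_py decode_zarith_py decode_zarith_py_alt
  have h := zGroups_rel raw_bytes start 4 0 []
  rw [add_zero] at h
  rw [h]
  cases hg : zGroupsA raw_bytes start 4 0 [] with
  | none => rfl
  | some p =>
    obtain ⟨rl, c⟩ := p
    have h2 : start + c - start = c := by ring
    simp [h2]
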